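-- pv_equiv track=rewrite | github.com/Moxirbek236/homework | problem3.py | calculate_painting_time
-- ===== SOURCE A (Python) =====
-- def calculate_painting_time(pattern: list) -> int:
--     if not pattern:
--         return 0
--
--     time = 1  # Start with 1 minute for the first section
--     time_count = 1
--
--     for i in range(1, len(pattern)):
--         time += 2  # Increment time if the color changes
--         if pattern[i] != pattern[i - 1]:
--             time_count += 1  # Reset time count for a new color
--
--     return time + time_count
-- ===== SOURCE B (Python) =====
-- def calculate_painting_time(pattern: list) -> int:
--     # Run-skipping scan: count maximal runs of equal colors, then closed form.
--     if not pattern: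
--         return 0
--     n = len(pattern)
--     runs = 0
--     i = 0
--     while i < n:
--         runs += 1
--         v = pattern[i]
--         while i < n and pattern[i] == v:
--             i += 1
--     return 2 * n + (runs - 1)
-- ===== Notes on version B (the rewrite author's own statement) =====
-- stated objective: alternative
-- what changed: Replaces the pairwise predecessor-comparison loop accumulating two counters with a run-skipping scan that counts maximal runs of equal colors and a closed form 2*n + (runs - 1) for the time.
import Mathlib
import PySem

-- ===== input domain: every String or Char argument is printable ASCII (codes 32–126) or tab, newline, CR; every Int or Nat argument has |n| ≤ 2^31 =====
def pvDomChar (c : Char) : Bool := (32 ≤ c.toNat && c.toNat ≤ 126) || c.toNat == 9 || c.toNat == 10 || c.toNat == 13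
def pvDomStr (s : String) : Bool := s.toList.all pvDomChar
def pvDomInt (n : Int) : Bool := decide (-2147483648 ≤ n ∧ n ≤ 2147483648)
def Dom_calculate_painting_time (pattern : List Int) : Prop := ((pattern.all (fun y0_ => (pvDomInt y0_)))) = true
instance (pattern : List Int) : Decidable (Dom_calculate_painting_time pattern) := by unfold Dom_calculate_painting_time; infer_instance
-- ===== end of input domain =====

-- B replaces A's pairwise predecessor-comparison loop with a run-skipping scan counting
-- maximal runs plus the closed form 2*n + (runs - 1); alternative decomposition, same cost.


-- ===== PORT A =====
-- literal port of A: for i in range(1, len(pattern)): time += 2; if pattern[i] != pattern[i-1]: time_count += 1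
def calculate_painting_time (pattern : List Int) : Int :=
  if pattern = [] then 0
  else
    let st := (PySem.List.pyRange 1 (pattern.length : Int) 1).foldl
      (fun (st : Int × Int) i =>
        (st.1 + 2,
         if PySem.List.pyGetD pattern i 0 ≠ PySem.List.pyGetD pattern (i - 1) 0 then st.2 + 1 else st.2))
      (1, 1)
    st.1 + st.2

-- ===== PORT B =====
-- inner `while` of Source B: skip the maximal run of the current color, count one run per outer step
def pvCountRuns : List Int → Int
  | [] => 0
  | x :: xs => 1 + pvCountRuns (xs.dropWhile (· == x))
termination_by xs => xs.length
decreasing_by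
  simpa using Nat.lt_succ_of_le (List.length_dropWhile_le _ _)

def calculate_painting_time_alt (pattern : List Int) : Int :=
  if pattern = [] then 0
  else 2 * (pattern.length : Int) + (pvCountRuns pattern - 1)

-- ===== PRECONDITION & SPEC =====
def Spec_calculate_painting_time (pattern : List Int) (out : Int) : Prop := out = calculate_painting_time_alt pattern
instance (pattern : List Int) (out : Int) : Decidable (Spec_calculate_painting_time pattern out) := by unfold Spec_calculate_painting_time; infer_instance

-- ===== CLAIM (what is proved, stated in full; the proofs are below) =====
def Claim_equal_calculate_painting_time : Prop := ∀ (pattern : List Int), Dom_calculate_painting_time pattern → Spec_calculate_painting_time pattern (calculate_painting_time pattern)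

-- ===== LEMMAS AND PROOFS =====

/-- number of adjacent changes in `x :: xs` -/
def pvChanges (x : Int) : List Int → Int
  | [] => 0
  | y :: ys => (if x ≠ y then 1 else 0) + pvChanges y ys

lemma pvCountRuns_cons (x : Int) (xs : List Int) :
    pvCountRuns (x :: xs) = 1 + pvChanges x xs := by
  induction xs generalizing x with
  | nil => simp [pvCountRuns, pvChanges]
  | cons y ys ih =>
    by_cases h : x = y
    · subst h
      have : pvCountRuns (x :: x :: ys) = pvCountRuns (x :: ys) := by
        simp [pvCountRuns]
      rw [this, ih]
      simp [pvChanges]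
    · have hd : (y :: ys).dropWhile (· == x) = y :: ys := by
        have hb : (y == x) = false := by simp; exact Ne.symm h
        simp [List.dropWhile, hb]
      rw [pvCountRuns, hd, ih]
      simp [pvChanges, h]

lemma pvGetD_cons_succ (z : Int) (b : List Int) (m : Nat) (d : Int) :
    PySem.List.pyGetD (z :: b) ((m : Int) + 1) d = PySem.List.pyGetD b (m : Int) d := by
  have : ((m : Int) + 1) = ((m + 1 : Nat) : Int) := by push_cast; ring
  rw [this, PySem.List.pyGetD_natCast, PySem.List.pyGetD_natCast]
  simp [List.getD]

/-- A's loop body's count component, stated as a fold over the index range. -/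
lemma pvCountLoop (x : Int) (xs : List Int) (c : Int) :
    (PySem.List.pyRange 1 (1 + (xs.length : Int)) 1).foldl
      (fun acc i =>
        if PySem.List.pyGetD (x :: xs) i 0 ≠ PySem.List.pyGetD (x :: xs) (i - 1) 0 then acc + 1 else acc)
      c = c + pvChanges x xs := by
  induction xs generalizing x c with
  | nil => simp [PySem.List.pyRange_one_eq_nil, pvChanges]
  | cons y ys ih =>
    have hcons : PySem.List.pyRange 1 (1 + ((y :: ys).length : Int)) 1
        = 1 :: PySem.List.pyRange 2 (1 + ((y :: ys).length : Int)) 1 := by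
      apply PySem.List.pyRange_one_cons; simp
    rw [hcons]
    simp only [List.foldl_cons]
    have h1 : PySem.List.pyGetD (x :: y :: ys) 1 0 = y := by
      have := pvGetD_cons_succ x (y :: ys) 0 0
      simpa [PySem.List.pyGetD_zero_cons] using this
    have h0 : PySem.List.pyGetD (x :: y :: ys) (1 - 1) 0 = x := by
      norm_num [PySem.List.pyGetD_zero_cons]
    rw [h1, h0]
    -- shift the remaining fold from indices 2.. on (x::y::ys) to indices 1.. on (y::ys)
    have hb : (1 + ((y :: ys).length : Int)) = (1 + (ys.length : Int)) + 1 := by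
      simp; ring
    have hmap : PySem.List.pyRange 2 ((1 + (ys.length : Int)) + 1) 1
        = (PySem.List.pyRange 1 (1 + (ys.length : Int)) 1).map (· + 1) := by
      rw [PySem.List.pyRange_one, PySem.List.pyRange_one]
      have : ((1 + (ys.length : Int)) + 1 - 2) = (1 + (ys.length : Int) - 1) := by ring
      rw [this, List.map_map]
      apply List.map_congr_left
      intro k _
      simp; ring
    rw [hb, hmap, List.foldl_map]
    have hshift : ∀ (init : Int),
        (PySem.List.pyRange 1 (1 + (ys.length : Int)) 1).foldl
          (fun acc i =>
            if PySem.List.pyGetD (x :: y :: ys) (i + 1) 0 ≠ PySem.List.pyGetD (x :: y :: ys) (i + 1 - 1) 0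
            then acc + 1 else acc) init
        = (PySem.List.pyRange 1 (1 + (ys.length : Int)) 1).foldl
          (fun acc i =>
            if PySem.List.pyGetD (y :: ys) i 0 ≠ PySem.List.pyGetD (y :: ys) (i - 1) 0
            then acc + 1 else acc) init := by
      intro init
      apply PySem.List.foldl_congr_mem
      intro acc i hi
      have hi' := (PySem.List.mem_pyRange_one).mp hi
      obtain ⟨h1i, _⟩ := hi'
      -- i ≥ 1, write i = (m : Int) and i - 1 = (m' : Int)
      obtain ⟨m, hm⟩ : ∃ m : Nat, i = (m : Int) := ⟨i.toNat, by omega⟩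
      subst hm
      have hga : PySem.List.pyGetD (x :: y :: ys) ((m : Int) + 1) 0 = PySem.List.pyGetD (y :: ys) (m : Int) 0 :=
        pvGetD_cons_succ _ _ _ _
      have hm1 : 1 ≤ m := by exact_mod_cast h1i
      obtain ⟨m', rfl⟩ : ∃ m', m = m' + 1 := ⟨m - 1, by omega⟩
      have he1 : ((m' + 1 : Nat) : Int) + 1 - 1 = ((m' : Int) + 1) := by push_cast; ring
      have he2 : ((m' + 1 : Nat) : Int) - 1 = ((m' : Nat) : Int) := by push_cast; ring
      rw [he1, he2, hga, pvGetD_cons_succ x (y :: ys) m' 0]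
    rw [hshift, ih]
    by_cases hxy : x = y
    · subst hxy; simp [pvChanges]
    · have hyx : ¬ (y = x) := fun h => hxy h.symm
      simp [pvChanges, hxy, hyx]
      omega

/-- the time component of A's fold: the first projection is 1 + 2 * (number of iterations). -/
lemma pvTimeLoop (xs : List Int) (f : Int × Int → Int → Int) (t c : Int) :
    ((PySem.List.pyRange 1 (xs.length : Int) 1).foldl
      (fun (st : Int × Int) i => (st.1 + 2, f st i)) (t, c)).1
    = t + 2 * ((xs.length : Int) - 1).toNat := by
  have : ∀ (l : List Int) (t c : Int),
      ((l.foldl (fun (st : Int × Int) i => (st.1 + 2, f st i)) (t, c)).1)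
      = t + 2 * l.length := by
    intro l
    induction l with
    | nil => simp
    | cons a l ih =>
      intro t c
      rw [List.foldl_cons, ih]
      simp; ring
  rw [this, PySem.List.length_pyRange_one]

lemma pvCountProj (xs : List Int) (x : Int) (t c : Int) :
    ((PySem.List.pyRange 1 ((x :: xs).length : Int) 1).foldl
      (fun (st : Int × Int) i =>
        (st.1 + 2,
         if PySem.List.pyGetD (x :: xs) i 0 ≠ PySem.List.pyGetD (x :: xs) (i - 1) 0 then st.2 + 1 else st.2))
      (t, c)).2 = c + pvChanges x xs := by
  have hsplit : ∀ (l : List Int) (t c : Int),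
      (l.foldl (fun (st : Int × Int) i =>
        (st.1 + 2,
         if PySem.List.pyGetD (x :: xs) i 0 ≠ PySem.List.pyGetD (x :: xs) (i - 1) 0 then st.2 + 1 else st.2))
        (t, c)).2
      = l.foldl (fun acc i =>
          if PySem.List.pyGetD (x :: xs) i 0 ≠ PySem.List.pyGetD (x :: xs) (i - 1) 0 then acc + 1 else acc) c := by
    intro l
    induction l with
    | nil => simp
    | cons a l ih =>
      intro t c
      rw [List.foldl_cons, List.foldl_cons]
      exact ih _ _
  rw [hsplit]
  have hlen : ((x :: xs).length : Int) = 1 + (xs.length : Int) := by simp; ring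
  rw [hlen]
  exact pvCountLoop x xs c

-- ===== VERDICT (by name: the statement is the Claim_ definition above) =====
theorem calculate_painting_time_spec : Claim_equal_calculate_painting_time := by
  intro pattern _
  unfold Spec_calculate_painting_time calculate_painting_time calculate_painting_time_alt
  cases pattern with
  | nil => simp
  | cons x xs =>
    simp only [if_neg (List.cons_ne_nil x xs)]
    rw [pvTimeLoop (x :: xs)
        (fun st i => if PySem.List.pyGetD (x :: xs) i 0 ≠ PySem.List.pyGetD (x :: xs) (i - 1) 0 then st.2 + 1 else st.2)
        1 1,
      pvCountProj xs x 1 1, pvCountRuns_cons]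
    have hl : (((x :: xs).length : Int) - 1).toNat = xs.length := by simp
    rw [hl]
    simp only [List.length_cons]
    push_cast
    ring
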